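-- pv_equiv track=rewrite | github.com/ifmelchor/seisvo | seisvo/plotting/__init__.py | count_consec
-- ===== SOURCE A (Python) =====
-- def count_consec(listrand):
--     count=1
--     consec_list=[]
--
--     first = False
--     for i in range(len(listrand[:-1])):
--         if first is False:
--             first=listrand[i]
--
--         if listrand[i]+1 == listrand[i+1]:
--             count+=1
--
--         else:
--             consec_list.append((first, count))
--             first = False
--             count=1
--
--     # Account for the last iteration
--     if first is False:
--         first=listrand[-1]
--
--     consec_list.append((first, count))
--     return consec_list
-- ===== SOURCE B (Python) =====
-- def count_consec(listrand):
--     n = len(listrand)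
--     bounds = [0] + [i + 1 for i in range(n - 1) if listrand[i] + 1 != listrand[i + 1]] + [n]
--     return [(listrand[s], e - s) for s, e in zip(bounds, bounds[1:])]
-- ===== Notes on version B (the rewrite author's own statement) =====
-- stated objective: alternative
-- what changed: B replaces A's stateful single pass with a False-sentinel run accumulator by a boundary-detection algorithm: it collects the indices where consecutiveness breaks, brackets them with 0 and n, and maps adjacent boundary pairs to (start value, run length).
import Mathlib
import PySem

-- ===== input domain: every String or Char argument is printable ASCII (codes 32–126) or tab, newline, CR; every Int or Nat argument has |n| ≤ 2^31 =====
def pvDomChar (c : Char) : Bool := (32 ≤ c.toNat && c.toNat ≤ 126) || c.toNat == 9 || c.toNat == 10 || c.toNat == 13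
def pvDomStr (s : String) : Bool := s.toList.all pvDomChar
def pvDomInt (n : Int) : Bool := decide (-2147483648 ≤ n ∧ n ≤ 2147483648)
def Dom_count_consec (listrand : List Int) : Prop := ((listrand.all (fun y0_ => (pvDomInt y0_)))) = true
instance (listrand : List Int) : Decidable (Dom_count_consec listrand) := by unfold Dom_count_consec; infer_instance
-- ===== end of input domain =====

-- B groups runs by boundary indices instead of A's sentinel-state scan; same value on every
-- nonempty list (both implementations raise IndexError on the empty list, excluded by Pre_).

-- ===== PORT A =====
-- loop body of A's for-loop: state is (count, consec_list, first); first = none models Python's False sentinel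
def stepA (listrand : List Int) (acc : Int × List (Int × Int) × Option Int) (i : Int) :
    Int × List (Int × Int) × Option Int :=
  let first := if acc.2.2 = none then PySem.List.pyGet? listrand i else acc.2.2
  if (PySem.List.pyGet? listrand i).getD 0 + 1 = (PySem.List.pyGet? listrand (i + 1)).getD 0 then
    (acc.1 + 1, acc.2.1, first)
  else
    (1, acc.2.1 ++ [(first.getD 0, acc.1)], none)

def count_consec (listrand : List Int) : List (Int × Int) :=
  let st := (PySem.List.pyRange 0 ((PySem.List.slice listrand none (some (-1))).length : Int) 1).foldl
    (stepA listrand) (1, [], none)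
  let first := if st.2.2 = none then PySem.List.pyGet? listrand (-1) else st.2.2
  st.2.1 ++ [(first.getD 0, st.1)]

-- ===== PORT B =====
-- Source B's comprehension filter: True at i iff the run breaks between positions i and i+1
def breakB (listrand : List Int) (i : Int) : Bool :=
  !((PySem.List.pyGet? listrand i).getD 0 + 1 == (PySem.List.pyGet? listrand (i + 1)).getD 0)

def count_consec_alt (listrand : List Int) : List (Int × Int) :=
  let n : Int := (listrand.length : Int)
  let bounds : List Int :=
    [0] ++ ((PySem.List.pyRange 0 (n - 1) 1).filter (breakB listrand)).map (· + 1) ++ [n]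
  (bounds.zip bounds.tail).map (fun se => ((PySem.List.pyGet? listrand se.1).getD 0, se.2 - se.1))

-- ===== PRECONDITION & SPEC =====
-- Pre_ excludes exactly the empty list, on which Python A raises IndexError (listrand[-1]).
def Pre_count_consec (listrand : List Int) : Prop := listrand ≠ []
instance (listrand : List Int) : Decidable (Pre_count_consec listrand) := by
  unfold Pre_count_consec; infer_instance

def pvWitness_count_consec : List Int := [1, 2, 5]

def Spec_count_consec (listrand : List Int) (out : List (Int × Int)) : Prop := out = count_consec_alt listrand
instance (listrand : List Int) (out : List (Int × Int)) : Decidable (Spec_count_consec listrand out) := by unfold Spec_count_consec; infer_instance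

-- ===== CLAIM (what is proved, stated in full; the proofs are below) =====
def Claim_equal_count_consec : Prop := ∀ (listrand : List Int), Dom_count_consec listrand → Pre_count_consec listrand → Spec_count_consec listrand (count_consec listrand)

-- ===== LEMMAS AND PROOFS =====

-- common characterisation: grow start len rest extends the current run (start, len) through rest
def grow (start : Int) (len : Int) : List Int → List (Int × Int)
  | [] => [(start, len)]
  | y :: ys => if start + len = y then grow start (len + 1) ys else (start, len) :: grow y 1 ys

theorem A_loop (l : List Int) (rest : List Int) : ∀ (j : Nat) (cur c : Int)
    (out : List (Int × Int)) (first : Option Int) (start : Int),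
    l.drop j = cur :: rest → first.getD cur = start → start + c = cur + 1 →
    (let st := (PySem.List.pyRange (j : Int) ((l.length - 1 : Nat) : Int) 1).foldl
        (stepA l) (c, out, first)
     let f := if st.2.2 = none then PySem.List.pyGet? l (-1) else st.2.2
     st.2.1 ++ [(f.getD 0, st.1)]) = out ++ grow start c rest := by
  induction rest with
  | nil =>
    intro j cur c out first start h hf hs
    have hlen : l.length = j + 1 := by
      have := congrArg List.length h; simp at this; omega
    have hget : l.getLast? = some cur := by
      rw [List.getLast?_eq_getElem?, hlen]
      have := List.getElem?_drop (xs := l) (i := j) (j := 0)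
      simp [h] at this; simpa using this.symm
    have hr : PySem.List.pyRange (j : Int) ((l.length - 1 : Nat) : Int) 1 = [] := by
      apply PySem.List.pyRange_one_eq_nil; simp [hlen]
    rw [hr]
    simp only [List.foldl_nil, grow]
    cases first with
    | none => simp [PySem.List.pyGet?_neg_one, hget]; simp at hf; omega
    | some v => simp at hf; simp [hf]
  | cons y ys ih =>
    intro j cur c out first start h hf hs
    have hj1 : l.drop (j + 1) = y :: ys := by
      rw [← List.tail_drop, h]; rfl
    have hjlen : j + 1 < l.length := by
      have := congrArg List.length hj1; simp at this; omega
    have hcur : PySem.List.pyGet? l (j : Int) = some cur := by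
      rw [PySem.List.pyGet?_natCast]
      have := List.getElem?_drop (xs := l) (i := j) (j := 0)
      simp [h] at this; simpa using this.symm
    have hy : PySem.List.pyGet? l ((j : Int) + 1) = some y := by
      have hcast : ((j : Int) + 1) = ((j + 1 : Nat) : Int) := by push_cast; ring
      rw [hcast, PySem.List.pyGet?_natCast]
      have := List.getElem?_drop (xs := l) (i := j + 1) (j := 0)
      simp [hj1] at this; simpa using this.symm
    have hr : PySem.List.pyRange (j : Int) ((l.length - 1 : Nat) : Int) 1
        = (j : Int) :: PySem.List.pyRange ((j : Int) + 1) ((l.length - 1 : Nat) : Int) 1 := by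
      apply PySem.List.pyRange_one_cons
      exact_mod_cast (show j < l.length - 1 by omega)
    rw [hr]
    simp only [List.foldl_cons]
    have hfirst : (if first = none then some cur else first) = some start := by
      cases first with
      | none => simp; simp at hf; omega
      | some v => simp at hf; simp [hf]
    have hcast : ((j : Int) + 1) = ((j + 1 : Nat) : Int) := by push_cast; ring
    by_cases hc : cur + 1 = y
    · have hstep : stepA l (c, out, first) (j : Int) = (c + 1, out, some start) := by
        simp only [stepA, hcur, hy]
        simp only [hfirst]
        simp [hc]
      rw [hstep, hcast]
      have := ih (j + 1) y (c + 1) out (some start) start hj1 (by simp) (by omega)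
      simp only at this
      rw [this]
      have : grow start c (y :: ys) = grow start (c + 1) ys := by
        rw [grow]; simp [show start + c = y by omega]
      rw [this]
    · have hstep : stepA l (c, out, first) (j : Int)
          = (1, out ++ [(start, c)], none) := by
        simp only [stepA, hcur, hy]
        simp only [hfirst]
        simp [hc]
      rw [hstep, hcast]
      have := ih (j + 1) y 1 (out ++ [(start, c)]) none y hj1 (by simp) (by omega)
      simp only at this
      rw [this]
      have : grow start c (y :: ys) = (start, c) :: grow y 1 ys := by
        rw [grow]; simp [show ¬ (start + c = y) by omega]
      rw [this]
      simp

theorem B_loop (l : List Int) (rest : List Int) : ∀ (j : Nat) (cur s start len : Int),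
    l.drop j = cur :: rest → PySem.List.pyGet? l s = some start →
    s + len = (j : Int) + 1 → start + len = cur + 1 →
    (((s :: (((PySem.List.pyRange (j : Int) ((l.length - 1 : Nat) : Int) 1).filter
          (breakB l)).map (· + 1) ++ [(l.length : Int)])).zip
        (((PySem.List.pyRange (j : Int) ((l.length - 1 : Nat) : Int) 1).filter
          (breakB l)).map (· + 1) ++ [(l.length : Int)])).map
      (fun se => ((PySem.List.pyGet? l se.1).getD 0, se.2 - se.1)))
      = grow start len rest := by
  induction rest with
  | nil =>
    intro j cur s start len h hst hidx hrun
    have hlen : l.length = j + 1 := by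
      have := congrArg List.length h; simp at this; omega
    have hr : PySem.List.pyRange (j : Int) ((l.length - 1 : Nat) : Int) 1 = [] := by
      apply PySem.List.pyRange_one_eq_nil; simp [hlen]
    rw [hr]
    simp only [List.filter_nil, List.map_nil, List.nil_append, List.zip_cons_cons,
      List.zip_nil_right, List.map_cons, List.map_nil, grow, hst]
    have : (l.length : Int) - s = len := by rw [hlen]; push_cast; omega
    simp [this]
  | cons y ys ih =>
    intro j cur s start len h hst hidx hrun
    have hj1 : l.drop (j + 1) = y :: ys := by
      rw [← List.tail_drop, h]; rfl
    have hjlen : j + 1 < l.length := by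
      have := congrArg List.length hj1; simp at this; omega
    have hcur : PySem.List.pyGet? l (j : Int) = some cur := by
      rw [PySem.List.pyGet?_natCast]
      have := List.getElem?_drop (xs := l) (i := j) (j := 0)
      simp [h] at this; simpa using this.symm
    have hcast : ((j : Int) + 1) = ((j + 1 : Nat) : Int) := by push_cast; ring
    have hy : PySem.List.pyGet? l ((j : Int) + 1) = some y := by
      rw [hcast, PySem.List.pyGet?_natCast]
      have := List.getElem?_drop (xs := l) (i := j + 1) (j := 0)
      simp [hj1] at this; simpa using this.symm
    have hr : PySem.List.pyRange (j : Int) ((l.length - 1 : Nat) : Int) 1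
        = (j : Int) :: PySem.List.pyRange ((j : Int) + 1) ((l.length - 1 : Nat) : Int) 1 := by
      apply PySem.List.pyRange_one_cons
      exact_mod_cast (show j < l.length - 1 by omega)
    rw [hr]
    by_cases hc : cur + 1 = y
    · have hfil : List.filter (breakB l)
          ((j : Int) :: PySem.List.pyRange ((j : Int) + 1) ((l.length - 1 : Nat) : Int) 1)
          = List.filter (breakB l)
            (PySem.List.pyRange ((j : Int) + 1) ((l.length - 1 : Nat) : Int) 1) := by
        rw [List.filter_cons]; simp [breakB, hcur, hy, hc]
      rw [hfil]
      have := ih (j + 1) y s start (len + 1) hj1 hst (by push_cast; omega) (by omega)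
      rw [← hcast] at this
      rw [this, grow]; simp [show start + len = y by omega]
    · have hfil : List.filter (breakB l)
          ((j : Int) :: PySem.List.pyRange ((j : Int) + 1) ((l.length - 1 : Nat) : Int) 1)
          = (j : Int) :: List.filter (breakB l)
            (PySem.List.pyRange ((j : Int) + 1) ((l.length - 1 : Nat) : Int) 1) := by
        rw [List.filter_cons]; simp [breakB, hcur, hy, hc]
      rw [hfil]
      simp only [List.map_cons, List.cons_append, List.zip_cons_cons, List.map_cons]
      have := ih (j + 1) y ((j : Int) + 1) y 1 hj1 hy (by push_cast; ring) (by ring)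
      rw [← hcast] at this
      rw [this, grow]
      simp only [show ¬ (start + len = y) by omega, if_false]
      simp [hst, show (j : Int) + 1 - s = len by omega]

-- ===== VERDICT (by name: the statement is the Claim_ definition above) =====
theorem count_consec_spec : Claim_equal_count_consec := by
  intro l _ hpre
  unfold Spec_count_consec
  obtain ⟨x, xs, rfl⟩ : ∃ x xs, l = x :: xs := by
    cases l with
    | nil => exact absurd rfl hpre
    | cons x xs => exact ⟨x, xs, rfl⟩
  have hA : count_consec (x :: xs) = grow x 1 xs := by
    have := A_loop (x :: xs) xs 0 x 1 [] none x (by simp) (by simp) (by ring)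
    simp only [Nat.cast_zero] at this
    unfold count_consec
    rw [PySem.List.slice_to_neg_one, List.length_dropLast]
    simpa using this
  have hB : count_consec_alt (x :: xs) = grow x 1 xs := by
    have := B_loop (x :: xs) xs 0 x 0 x 1 (by simp)
      (by rw [PySem.List.pyGet?_zero_cons]) (by simp) (by ring)
    simp only [Nat.cast_zero] at this
    unfold count_consec_alt
    have hn : ((x :: xs).length : Int) - 1 = (((x :: xs).length - 1 : Nat) : Int) := by
      simp
    simpa [hn] using this
  rw [hA, hB]
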